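-- pv_equiv track=rewrite | github.com/matheusht/adopt-redthread | adapters/bridge/binding_alias_table.py | reverse_alias_lookup
-- ===== SOURCE A (Python) =====
-- from typing import Any, NamedTuple
--
-- class AliasEntry(NamedTuple):
--     source_key: str
--     target_path: str
--     tier: str
--
-- _ALIAS_TABLE: list[AliasEntry] = [
--     AliasEntry("resource.id", "resourceId", "alias_match"),
--     AliasEntry("chat.id", "chatId", "alias_match"),
--     AliasEntry("chat.id", "id", "alias_match"),
--     AliasEntry("thread.id", "threadId", "alias_match"),
--     AliasEntry("session.id", "sessionId", "alias_match"),
--     AliasEntry("session.id", "query.sessionId", "alias_match"),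
--     AliasEntry("user.id", "userId", "alias_match"),
--     AliasEntry("account.id", "accountId", "alias_match"),
--     AliasEntry("item.id", "itemId", "alias_match"),
--     AliasEntry("order.id", "orderId", "alias_match"),
--     AliasEntry("post.id", "postId", "alias_match"),
--     AliasEntry("message.id", "messageId", "alias_match"),
-- ]
--
-- def reverse_alias_lookup(target_path: str, approved_aliases: list[dict[str, Any]] | None = None) -> list[tuple[str, str]]:
--     results: list[tuple[str, str]] = []
--     seen_sources: set[str] = set()
--     for entry in _runtime_entries(approved_aliases):
--         if entry.target_path == target_path and entry.source_key not in seen_sources: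
--             results.append((entry.source_key, entry.tier))
--             seen_sources.add(entry.source_key)
--     if target_path not in seen_sources:
--         results.append((target_path, "exact_name_match"))
--         seen_sources.add(target_path)
--     heuristic = _reverse_heuristic_source(target_path)
--     if heuristic and heuristic not in seen_sources:
--         results.append((heuristic, "heuristic_match"))
--     return results
--
-- def _runtime_entries(approved_aliases: list[dict[str, Any]] | None = None) -> list[AliasEntry]:
--     approved = [
--         AliasEntry(str(item.get("source_key", "")), str(item.get("target_path", "")), str(item.get("tier", "reviewed_pattern")))
--         for item in (approved_aliases or [])
--         if str(item.get("source_key", "")).strip() and str(item.get("target_path", "")).strip()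
--     ]
--     return approved + list(_ALIAS_TABLE)
--
-- def _reverse_heuristic_source(target_path: str) -> str | None:
--     if not target_path.endswith("Id") or len(target_path) <= 2:
--         return None
--     parent = target_path[:-2]
--     if not parent:
--         return None
--     return f"{parent.lower()}.id"
-- ===== SOURCE B (Python) =====
-- from typing import Any, NamedTuple
--
-- class AliasEntry(NamedTuple):
--     source_key: str
--     target_path: str
--     tier: str
--
-- _ALIAS_TABLE = [
--     AliasEntry("resource.id", "resourceId", "alias_match"),
--     AliasEntry("chat.id", "chatId", "alias_match"),
--     AliasEntry("chat.id", "id", "alias_match"),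
--     AliasEntry("thread.id", "threadId", "alias_match"),
--     AliasEntry("session.id", "sessionId", "alias_match"),
--     AliasEntry("session.id", "query.sessionId", "alias_match"),
--     AliasEntry("user.id", "userId", "alias_match"),
--     AliasEntry("account.id", "accountId", "alias_match"),
--     AliasEntry("item.id", "itemId", "alias_match"),
--     AliasEntry("order.id", "orderId", "alias_match"),
--     AliasEntry("post.id", "postId", "alias_match"),
--     AliasEntry("message.id", "messageId", "alias_match"),
-- ]
--
-- def _runtime_entries(approved_aliases=None):
--     approved = [
--         AliasEntry(str(item.get("source_key", "")), str(item.get("target_path", "")), str(item.get("tier", "reviewed_pattern")))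
--         for item in (approved_aliases or [])
--         if str(item.get("source_key", "")).strip() and str(item.get("target_path", "")).strip()
--     ]
--     return approved + list(_ALIAS_TABLE)
--
-- def _reverse_heuristic_source(target_path):
--     if not target_path.endswith("Id") or len(target_path) <= 2:
--         return None
--     parent = target_path[:-2]
--     if not parent:
--         return None
--     return f"{parent.lower()}.id"
--
-- def _dedup_by_key(pairs):
--     # first-occurrence dedup by structural recursion: keep the head,
--     # purge every later pair sharing its key from the tail, recurse.
--     if not pairs:
--         return []
--     head = pairs[0]
--     return [head] + _dedup_by_key([p for p in pairs[1:] if p[0] != head[0]])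
--
-- def reverse_alias_lookup(target_path, approved_aliases=None):
--     heuristic = _reverse_heuristic_source(target_path)
--     candidates = (
--         [(e.source_key, e.tier) for e in _runtime_entries(approved_aliases) if e.target_path == target_path]
--         + [(target_path, "exact_name_match")]
--         + ([(heuristic, "heuristic_match")] if heuristic else [])
--     )
--     return _dedup_by_key(candidates)
-- ===== Notes on version B (the rewrite author's own statement) =====
-- stated objective: alternative
-- what changed: B concatenates all candidate (source_key, tier) pairs (alias matches, exact-name fallback, heuristic) into one flat list and then deduplicates it stateless by structural recursion — keep the head pair and filter every later pair with the same key out of the tail — instead of A's single stateful scan with a seen-set and conditional appends.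
import Mathlib
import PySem

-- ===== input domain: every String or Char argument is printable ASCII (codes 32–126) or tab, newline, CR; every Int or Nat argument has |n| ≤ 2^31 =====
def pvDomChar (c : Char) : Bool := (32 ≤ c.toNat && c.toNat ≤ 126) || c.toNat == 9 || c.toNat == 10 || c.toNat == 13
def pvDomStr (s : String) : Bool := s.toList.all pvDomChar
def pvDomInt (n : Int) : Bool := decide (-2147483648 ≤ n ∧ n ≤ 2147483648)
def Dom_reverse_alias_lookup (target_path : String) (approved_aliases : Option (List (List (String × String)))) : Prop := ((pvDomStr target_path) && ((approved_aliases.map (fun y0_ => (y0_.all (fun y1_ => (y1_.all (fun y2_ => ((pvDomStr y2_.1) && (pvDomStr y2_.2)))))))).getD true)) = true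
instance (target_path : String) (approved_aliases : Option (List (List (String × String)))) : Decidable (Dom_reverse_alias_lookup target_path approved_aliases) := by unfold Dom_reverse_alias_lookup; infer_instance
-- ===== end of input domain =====

-- B is an alternative decomposition: one flat candidate list, deduplicated statelessly by a
-- filtering recursion (keep the head, purge its key from the tail) instead of A's seen-set scan.

-- ===== PORT A =====
-- module constant _ALIAS_TABLE (AliasEntry = source_key × target_path × tier); shared by both ports
def pvAliasTable : List (String × String × String) :=
  [("resource.id", "resourceId", "alias_match"),
   ("chat.id", "chatId", "alias_match"),
   ("chat.id", "id", "alias_match"),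
   ("thread.id", "threadId", "alias_match"),
   ("session.id", "sessionId", "alias_match"),
   ("session.id", "query.sessionId", "alias_match"),
   ("user.id", "userId", "alias_match"),
   ("account.id", "accountId", "alias_match"),
   ("item.id", "itemId", "alias_match"),
   ("order.id", "orderId", "alias_match"),
   ("post.id", "postId", "alias_match"),
   ("message.id", "messageId", "alias_match")]

-- _runtime_entries (helper, used unchanged by both A and B; str() of a str is the identity)
def pvRuntimeEntries (approved_aliases : Option (List (List (String × String)))) : List (String × String × String) :=
  let approved :=
    ((approved_aliases.getD []).filter (fun item =>
        !(PySem.Str.strip ((PySem.Dict.mk item).getD "source_key" "") == "") &&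
        !(PySem.Str.strip ((PySem.Dict.mk item).getD "target_path" "") == ""))).map
      (fun item =>
        ((PySem.Dict.mk item).getD "source_key" "",
         (PySem.Dict.mk item).getD "target_path" "",
         (PySem.Dict.mk item).getD "tier" "reviewed_pattern"))
  approved ++ pvAliasTable

-- _reverse_heuristic_source (helper, used unchanged by both A and B)
def pvReverseHeuristicSource (target_path : String) : Option String :=
  if !(PySem.Str.endswith target_path "Id") || PySem.Str.len target_path ≤ 2 then none
  else
    let parent := PySem.Str.slice target_path none (some (-2))
    if parent == "" then none
    else some (PySem.Str.lower parent ++ ".id")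

def reverse_alias_lookup (target_path : String) (approved_aliases : Option (List (List (String × String)))) : List (String × String) :=
  -- the loop over _runtime_entries appending under the seen-set guard
  let st :=
    (pvRuntimeEntries approved_aliases).foldl
      (fun (st : List (String × String) × PySem.Set String) e =>
        if e.2.1 == target_path && !(PySem.Set.contains st.2 e.1) then
          (st.1 ++ [(e.1, e.2.2)], PySem.Set.add st.2 e.1)
        else st)
      ([], PySem.Set.empty)
  -- 'if target_path not in seen_sources' (exact_name_match fallback)
  let st :=
    if !(PySem.Set.contains st.2 target_path) then
      (st.1 ++ [(target_path, "exact_name_match")], PySem.Set.add st.2 target_path)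
    else st
  -- 'if heuristic and heuristic not in seen_sources' (truthiness = non-None and nonempty)
  match pvReverseHeuristicSource target_path with
  | none => st.1
  | some h =>
      if h == "" then st.1
      else if PySem.Set.contains st.2 h then st.1
      else st.1 ++ [(h, "heuristic_match")]

-- ===== PORT B =====
-- _dedup_by_key: stateless first-occurrence dedup — keep the head, filter its key from the tail
def pvDedupByKey : List (String × String) → List (String × String)
  | [] => []
  | p :: rest => p :: pvDedupByKey (rest.filter (fun q => !(q.1 == p.1)))
termination_by l => l.length
decreasing_by
  have h1 := List.length_filter_le (fun x : {x // x ∈ rest} => !(x.1).1 == p.1) rest.attach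
  simp at h1 ⊢
  omega

def reverse_alias_lookup_alt (target_path : String) (approved_aliases : Option (List (List (String × String)))) : List (String × String) :=
  let heuristic := pvReverseHeuristicSource target_path
  let candidates :=
    ((pvRuntimeEntries approved_aliases).filter (fun e => e.2.1 == target_path)).map
        (fun e => (e.1, e.2.2))
      ++ [(target_path, "exact_name_match")]
      ++ (match heuristic with
          | none => []
          | some h => if h == "" then [] else [(h, "heuristic_match")])
  pvDedupByKey candidates

-- ===== PRECONDITION & SPEC =====
def Spec_reverse_alias_lookup (target_path : String) (approved_aliases : Option (List (List (String × String)))) (out : List (String × String)) : Prop := out = reverse_alias_lookup_alt target_path approved_aliases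
instance (target_path : String) (approved_aliases : Option (List (List (String × String)))) (out : List (String × String)) : Decidable (Spec_reverse_alias_lookup target_path approved_aliases out) := by unfold Spec_reverse_alias_lookup; infer_instance

-- ===== CLAIM (what is proved, stated in full; the proofs are below) =====
def Claim_equal_reverse_alias_lookup : Prop := ∀ (target_path : String) (approved_aliases : Option (List (List (String × String)))), Dom_reverse_alias_lookup target_path approved_aliases → Spec_reverse_alias_lookup target_path approved_aliases (reverse_alias_lookup target_path approved_aliases)

-- ===== LEMMAS AND PROOFS =====

-- one step of A's first-occurrence dedup on a (results, seen) state
def pvDStep (st : List (String × String) × PySem.Set String) (p : String × String) : List (String × String) × PySem.Set String :=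
  if PySem.Set.contains st.2 p.1 then st else (st.1 ++ [p], PySem.Set.add st.2 p.1)

-- dedup relative to an already-seen key list (intermediate form bridging A and B)
def pvNubFrom (s : List String) : List (String × String) → List (String × String)
  | [] => []
  | p :: rest => if p.1 ∈ s then pvNubFrom s rest else p :: pvNubFrom (s ++ [p.1]) rest

-- A's guarded loop over the entries is the pvDStep fold over the filtered-and-projected candidates
theorem pvStepA_eq (tp : String) (l : List (String × String × String)) (st : List (String × String) × PySem.Set String) :
    l.foldl (fun st e =>
        if e.2.1 == tp && !(PySem.Set.contains st.2 e.1) then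
          (st.1 ++ [(e.1, e.2.2)], PySem.Set.add st.2 e.1)
        else st) st
      = ((l.filter (fun e => e.2.1 == tp)).map (fun e => (e.1, e.2.2))).foldl pvDStep st := by
  induction l generalizing st with
  | nil => rfl
  | cons e l ih =>
    cases hm : e.2.1 == tp with
    | true =>
      have hstep : ∀ st : List (String × String) × PySem.Set String,
          (if e.2.1 == tp && !(PySem.Set.contains st.2 e.1) then
            (st.1 ++ [(e.1, e.2.2)], PySem.Set.add st.2 e.1) else st) = pvDStep st (e.1, e.2.2) := by
        intro st
        by_cases hmem : e.1 ∈ st.2 <;> simp [pvDStep, hm, PySem.Set.contains, hmem]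
      simp only [List.foldl_cons, hstep]
      simp only [List.filter_cons, hm, reduceIte, List.map_cons, List.foldl_cons, ih]
    | false =>
      simp only [List.foldl_cons, List.filter_cons, hm, Bool.false_and, Bool.false_eq_true,
        reduceIte, ih]

-- the if-absent guard written with the negated test is pvDStep
theorem pvIfNot_eq (st : List (String × String) × PySem.Set String) (k v : String) :
    (if !(PySem.Set.contains st.2 k) then (st.1 ++ [(k, v)], PySem.Set.add st.2 k) else st)
      = pvDStep st (k, v) := by
  by_cases hmem : k ∈ st.2 <;> simp [pvDStep, PySem.Set.contains, hmem]

-- folding pvDStep appends pvNubFrom of the seen list and records exactly the new keys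
theorem pvFold_eq_nubFrom (c : List (String × String)) (res : List (String × String)) (s : PySem.Set String) :
    c.foldl pvDStep (res, s)
      = (res ++ pvNubFrom s c, s ++ (pvNubFrom s c).map Prod.fst) := by
  induction c generalizing res s with
  | nil => simp [pvNubFrom]
  | cons p rest ih =>
    by_cases hmem : p.1 ∈ s
    · have : pvDStep (res, s) p = (res, s) := by
        simp [pvDStep, PySem.Set.contains, hmem]
      simp [pvNubFrom, hmem, this, ih]
    · have hstep : pvDStep (res, s) p = (res ++ [p], s ++ [p.1]) := by
        simp [pvDStep, PySem.Set.contains, hmem, PySem.Set.add]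
      simp [pvNubFrom, hmem, hstep, ih]
  
-- pvDedupByKey's defining equations (it is a well-founded recursion)
theorem pvDedupByKey_nil : pvDedupByKey [] = [] := by simp [pvDedupByKey]
theorem pvDedupByKey_cons (p : String × String) (rest : List (String × String)) :
    pvDedupByKey (p :: rest) = p :: pvDedupByKey (rest.filter (fun q => !(q.1 == p.1))) := by
  rw [pvDedupByKey]

-- pvNubFrom s c is B's filtering dedup applied to c with the already-seen keys filtered out
theorem pvNubFrom_eq_dedup (c : List (String × String)) (s : List String) :
    pvNubFrom s c = pvDedupByKey (c.filter (fun q => !(decide (q.1 ∈ s)))) := by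
  induction c generalizing s with
  | nil => simp [pvNubFrom, pvDedupByKey_nil]
  | cons p rest ih =>
    by_cases hmem : p.1 ∈ s
    · simp [pvNubFrom, hmem, ih s]
    · have hfilter : (rest.filter (fun q => !(decide (q.1 ∈ s)))).filter (fun q => !(q.1 == p.1))
          = rest.filter (fun q => !(decide (q.1 ∈ s ++ [p.1]))) := by
        rw [List.filter_filter]
        apply List.filter_congr
        intro q _
        by_cases h1 : q.1 ∈ s <;> by_cases h2 : q.1 = p.1 <;> simp [h1, h2]
      rw [List.filter_cons_of_pos (by simp [hmem])]
      rw [pvNubFrom, if_neg hmem, pvDedupByKey_cons, hfilter, ih (s ++ [p.1])]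

-- B's dedup of the full candidate list equals the pvDStep fold from the empty state
theorem pvDedup_eq_fold (c : List (String × String)) :
    (c.foldl pvDStep ([], PySem.Set.empty)).1 = pvDedupByKey c := by
  rw [pvFold_eq_nubFrom]
  have : pvNubFrom [] c = pvDedupByKey c := by
    rw [pvNubFrom_eq_dedup]
    simp
  simpa [PySem.Set.empty] using this

-- the whole function, for an arbitrary entry list E and heuristic result ho
theorem pvMain (tp : String) (E : List (String × String × String)) (ho : Option String) :
    (let st := E.foldl (fun (st : List (String × String) × PySem.Set String) e =>
          if e.2.1 == tp && !(PySem.Set.contains st.2 e.1) then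
            (st.1 ++ [(e.1, e.2.2)], PySem.Set.add st.2 e.1)
          else st) ([], PySem.Set.empty);
     let st := if !(PySem.Set.contains st.2 tp) then
          (st.1 ++ [(tp, "exact_name_match")], PySem.Set.add st.2 tp) else st;
     match ho with
     | none => st.1
     | some h =>
         if h == "" then st.1
         else if PySem.Set.contains st.2 h then st.1
         else st.1 ++ [(h, "heuristic_match")])
    = pvDedupByKey
        (((E.filter (fun e => e.2.1 == tp)).map (fun e => (e.1, e.2.2)))
          ++ [(tp, "exact_name_match")]
          ++ (match ho with
              | none => []
              | some h => if h == "" then [] else [(h, "heuristic_match")])) := by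
  simp only [pvStepA_eq, pvIfNot_eq]
  set c0 := ((E.filter (fun e => e.2.1 == tp)).map (fun e => (e.1, e.2.2))) with hc0
  have hfold1 : pvDStep (c0.foldl pvDStep ([], PySem.Set.empty)) (tp, "exact_name_match")
      = (c0 ++ [(tp, "exact_name_match")]).foldl pvDStep ([], PySem.Set.empty) := by
    rw [List.foldl_append]; rfl
  have hDStep1 : ∀ (st : List (String × String) × PySem.Set String) (k v : String),
      (if PySem.Set.contains st.2 k then st.1 else st.1 ++ [(k, v)]) = (pvDStep st (k, v)).1 := by
    intro st k v
    by_cases h : k ∈ st.2 <;> simp [pvDStep, PySem.Set.contains, h]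
  cases ho with
  | none =>
    simp only [hfold1, pvDedup_eq_fold, List.append_nil]
  | some h =>
    cases hhe : h == "" with
    | true =>
      simp only [hhe, if_true, hfold1, pvDedup_eq_fold, List.append_nil]
    | false =>
      simp only [hhe, Bool.false_eq_true, if_false, hDStep1, hfold1]
      have : pvDStep ((c0 ++ [(tp, "exact_name_match")]).foldl pvDStep ([], PySem.Set.empty))
              (h, "heuristic_match")
          = ((c0 ++ [(tp, "exact_name_match")]) ++ [(h, "heuristic_match")]).foldl pvDStep ([], PySem.Set.empty) := by
        rw [List.foldl_append (l' := [(h, "heuristic_match")])]; rfl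
      rw [this, pvDedup_eq_fold]

-- ===== VERDICT (by name: the statement is the Claim_ definition above) =====
theorem reverse_alias_lookup_spec : Claim_equal_reverse_alias_lookup := by
  intro tp aa _
  exact pvMain tp (pvRuntimeEntries aa) (pvReverseHeuristicSource tp)
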